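-- pv_equiv track=rewrite | github.com/yunhuijang/MSR | analysis.py | map_multiset_from_cot
-- ===== SOURCE A (Python) =====
-- def map_multiset_from_cot(cot):
--
--     cot_splitted = cot.split(' ')
--     count_indices = [index for index, word in enumerate(cot_splitted) if word.isdigit()]
--     count_list = []
--     type_list = []
--     type_count_dict = {}
--     for start, end in zip(count_indices, count_indices[1:] + [-1]):
--         count_list.append(int(cot_splitted[start]))
--         if end == -1:
--             t = " ".join(cot_splitted[start+1:])[:-1]
--             # type_list.append()
--         else:
--             t = " ".join(cot_splitted[start+1:end])[:-1]
--             # type_list.append()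
--         if len(t) > 0:
--             if t[-1] == 's':
--                 t = t[:-1]
--             type_list.append(t)
--
--     for type, count in zip(type_list, count_list):
--         type_count_dict[type] = count
--
--     return dict(sorted(type_count_dict.items()))
-- ===== SOURCE B (Python) =====
-- def map_multiset_from_cot(cot):
--     # One left-to-right pass over the words, keeping the pending (count token, segment words).
--     count_list = []
--     type_list = []
--
--     def close(token, seg):
--         count_list.append(int(token))
--         t = " ".join(seg)[:-1]
--         if len(t) > 0:
--             if t[-1] == 's':
--                 t = t[:-1]
--             type_list.append(t)
--
--     cur = None  # pending (count token, list of following words)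
--     for w in cot.split(' '):
--         if w.isdigit():
--             if cur is not None:
--                 close(cur[0], cur[1])
--             cur = (w, [])
--         elif cur is not None:
--             cur[1].append(w)
--     if cur is not None:
--         close(cur[0], cur[1])
--
--     d = {}
--     for t, c in zip(type_list, count_list):
--         d[t] = c
--     return dict(sorted(d.items()))
-- ===== Notes on version B (the rewrite author's own statement) =====
-- stated objective: alternative
-- what changed: B replaces A's enumerate/zip-of-digit-indices plus per-segment list slicing by a single left-to-right state-machine pass over the words that accumulates the current segment and closes it at each digit token, keeping the same parallel count/type lists and final zip-dict-sort.
import Mathlib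
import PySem

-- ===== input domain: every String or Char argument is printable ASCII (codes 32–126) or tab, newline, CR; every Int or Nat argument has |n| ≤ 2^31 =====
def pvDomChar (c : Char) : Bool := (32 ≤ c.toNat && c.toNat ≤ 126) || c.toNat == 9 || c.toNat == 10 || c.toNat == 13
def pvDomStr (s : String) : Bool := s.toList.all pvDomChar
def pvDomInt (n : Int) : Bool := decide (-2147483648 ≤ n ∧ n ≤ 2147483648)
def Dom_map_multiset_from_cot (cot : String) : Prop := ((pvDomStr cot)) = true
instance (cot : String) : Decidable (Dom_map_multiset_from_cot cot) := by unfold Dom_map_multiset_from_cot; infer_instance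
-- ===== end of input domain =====

-- B is an alternative decomposition: one left-to-right state-machine pass over the words
-- (close the pending segment at each digit token) instead of A's enumerate/zip of digit
-- indices with per-segment list slicing; same cost, same return value.

-- ===== PORT A =====
-- A's loop body over one (start, end) pair: append int(words[start]); build t from the
-- slice (to the end of the list when end == -1), drop its last char, and append the
-- 's'-stripped type when non-empty.
def pvStepA (cot_splitted : List String) (acc : List Int × List String) (se : Int × Int) :
    List Int × List String :=
  let count_list := acc.1 ++ [(PySem.Int.ofStr? ((PySem.List.pyGet? cot_splitted se.1).getD "")).getD 0]
  let t := if se.2 == -1 then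
      PySem.Str.slice (PySem.Str.join " " (PySem.List.slice cot_splitted (some (se.1 + 1)) none)) none (some (-1))
    else
      PySem.Str.slice (PySem.Str.join " " (PySem.List.slice cot_splitted (some (se.1 + 1)) (some se.2))) none (some (-1))
  if 0 < PySem.Str.len t then
    let t := if (PySem.Str.pyGet? t (-1)).getD ' ' == 's' then PySem.Str.slice t none (some (-1)) else t
    (count_list, acc.2 ++ [t])
  else (count_list, acc.2)

def map_multiset_from_cot (cot : String) : List (String × Int) :=
  let cot_splitted := (PySem.Str.split? cot " ").getD []
  let count_indices : List Int := (PySem.List.enumerate cot_splitted).filterMap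
      (fun p => if PySem.Str.strIsdigit p.2 then some p.1 else none)
  let res := (count_indices.zip (count_indices.drop 1 ++ [-1])).foldl (pvStepA cot_splitted) ([], [])
  let type_count_dict := (res.2.zip res.1).foldl
      (fun (d : PySem.Dict String Int) tc => d.insert tc.1 tc.2) PySem.Dict.empty
  (PySem.Dict.ofList (PySem.List.sorted2 type_count_dict.items (fun p => p.1) (fun p => p.2))).items

-- ===== PORT B =====
-- B's close(): append the segment's count; append its [:-1]-then-'s'-stripped type if non-empty.
def pvClose (acc : List Int × List String) (token : String) (seg : List String) :
    List Int × List String :=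
  let count_list := acc.1 ++ [(PySem.Int.ofStr? token).getD 0]
  let t := PySem.Str.slice (PySem.Str.join " " seg) none (some (-1))
  if 0 < PySem.Str.len t then
    let t := if (PySem.Str.pyGet? t (-1)).getD ' ' == 's' then PySem.Str.slice t none (some (-1)) else t
    (count_list, acc.2 ++ [t])
  else (count_list, acc.2)

-- B's loop body: on a digit token close the pending segment and start a new one;
-- otherwise extend the pending segment (if any).
def pvStepB (st : (List Int × List String) × Option (String × List String)) (w : String) :
    (List Int × List String) × Option (String × List String) :=
  if PySem.Str.strIsdigit w then
    match st.2 with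
    | some cur => (pvClose st.1 cur.1 cur.2, some (w, []))
    | none => (st.1, some (w, []))
  else
    match st.2 with
    | some cur => (st.1, some (cur.1, cur.2 ++ [w]))
    | none => st

def map_multiset_from_cot_alt (cot : String) : List (String × Int) :=
  let st := ((PySem.Str.split? cot " ").getD []).foldl pvStepB (([], []), none)
  let res := match st.2 with
    | some cur => pvClose st.1 cur.1 cur.2
    | none => st.1
  let d := (res.2.zip res.1).foldl
      (fun (d : PySem.Dict String Int) tc => d.insert tc.1 tc.2) PySem.Dict.empty
  (PySem.Dict.ofList (PySem.List.sorted2 d.items (fun p => p.1) (fun p => p.2))).items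

-- ===== PRECONDITION & SPEC =====
def Spec_map_multiset_from_cot (cot : String) (out : List (String × Int)) : Prop := out = map_multiset_from_cot_alt cot
instance (cot : String) (out : List (String × Int)) : Decidable (Spec_map_multiset_from_cot cot out) := by unfold Spec_map_multiset_from_cot; infer_instance

-- ===== CLAIM (what is proved, stated in full; the proofs are below) =====
def Claim_equal_map_multiset_from_cot : Prop := ∀ (cot : String), Dom_map_multiset_from_cot cot → Spec_map_multiset_from_cot cot (map_multiset_from_cot cot)

-- ===== LEMMAS AND PROOFS =====

-- "not a digit token" (segment words)
def pvND (w : String) : Bool := !PySem.Str.strIsdigit w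

-- specification-level segmentation: (digit token, following non-digit words) groups
def pvSegs : List String → List (String × List String)
  | [] => []
  | w :: ws =>
    if PySem.Str.strIsdigit w then (w, ws.takeWhile pvND) :: pvSegs (ws.dropWhile pvND)
    else pvSegs ws
termination_by ws => ws.length
decreasing_by
  · have := List.length_dropWhile_le pvND ws
    simp only [List.length_cons]; omega
  · simp

-- per-segment count and optional type
def pvFC (p : String × List String) : Int := (PySem.Int.ofStr? p.1).getD 0
def pvGT (p : String × List String) : Option String :=
  let t := PySem.Str.slice (PySem.Str.join " " p.2) none (some (-1))
  if 0 < PySem.Str.len t then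
    some (if (PySem.Str.pyGet? t (-1)).getD ' ' == 's' then PySem.Str.slice t none (some (-1)) else t)
  else none

-- A's (start, end) index pair seen as (digit token, segment words)
def pvExtract (ws : List String) (p : Int × Int) : String × List String :=
  ((PySem.List.pyGet? ws p.1).getD "",
   if p.2 == -1 then PySem.List.slice ws (some (p.1 + 1)) none
   else PySem.List.slice ws (some (p.1 + 1)) (some p.2))

def pvIdxs (ws : List String) (s : Int) : List Int :=
  (PySem.List.enumerate ws s).filterMap (fun p => if PySem.Str.strIsdigit p.2 then some p.1 else none)

def pvPairs (ws : List String) : List (Int × Int) :=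
  (pvIdxs ws 0).zip ((pvIdxs ws 0).drop 1 ++ [-1])

-- shared tail of both ports: zip the two lists, overwrite into a dict, sort the items
def pvTail (res : List Int × List String) : List (String × Int) :=
  let d := (res.2.zip res.1).foldl
      (fun (d : PySem.Dict String Int) tc => d.insert tc.1 tc.2) PySem.Dict.empty
  (PySem.Dict.ofList (PySem.List.sorted2 d.items (fun p => p.1) (fun p => p.2))).items

-- B's finalisation of the fold state
def pvFin (st : (List Int × List String) × Option (String × List String)) :
    List Int × List String :=
  match st.2 with
  | some cur => pvClose st.1 cur.1 cur.2
  | none => st.1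

lemma pvClose_eq (acc : List Int × List String) (c : String) (seg : List String) :
    pvClose acc c seg = (acc.1 ++ [pvFC (c, seg)], acc.2 ++ (pvGT (c, seg)).toList) := by
  unfold pvClose pvFC pvGT
  by_cases h : 0 < (PySem.List.slice (PySem.Chars.join [' '] (List.map String.toList seg))
      none (some (-1))).length <;> simp [h]

lemma pvStepA_close (ws : List String) (acc : List Int × List String) (p : Int × Int) :
    pvStepA ws acc p = pvClose acc (pvExtract ws p).1 (pvExtract ws p).2 := by
  rcases p with ⟨s, e⟩
  by_cases h : (e == -1) = true <;> simp [pvStepA, pvClose, pvExtract, h]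

lemma pvStepA_eq (ws : List String) (acc : List Int × List String) (p : Int × Int) :
    pvStepA ws acc p = (acc.1 ++ [pvFC (pvExtract ws p)], acc.2 ++ (pvGT (pvExtract ws p)).toList) := by
  rw [pvStepA_close, pvClose_eq]

lemma pvA_fold (ws : List String) :
    ∀ (l : List (Int × Int)) (acc : List Int × List String),
      l.foldl (pvStepA ws) acc
        = (acc.1 ++ (l.map (pvExtract ws)).map pvFC,
           acc.2 ++ (l.map (pvExtract ws)).filterMap pvGT) := by
  intro l
  induction l with
  | nil => intro acc; simp
  | cons p l ih =>
      intro acc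
      rw [List.foldl_cons, pvStepA_eq, ih, List.map_cons, List.map_cons]
      cases hgt : pvGT (pvExtract ws p)
      · rw [List.filterMap_cons_none hgt]
        simp only [Option.toList, List.append_nil, List.append_assoc, List.singleton_append]
      · rw [List.filterMap_cons_some hgt]
        simp only [Option.toList, List.append_assoc, List.singleton_append]

lemma pvB_none (ws : List String) :
    ∀ (acc : List Int × List String),
      ws.foldl pvStepB (acc, none) = (ws.dropWhile pvND).foldl pvStepB (acc, none) := by
  induction ws with
  | nil => intro acc; rfl
  | cons w ws ih =>
      intro acc
      cases hw : PySem.Chars.strIsdigit w.toList with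
      | true => simp [List.dropWhile_cons, pvND, hw]
      | false =>
          have hstep : pvStepB (acc, none) w = (acc, none) := by simp [pvStepB, hw]
          simp [List.dropWhile_cons, pvND, hw, hstep, ih]

lemma pvB_some (ws : List String) :
    ∀ (seg : List String) (acc : List Int × List String) (c : String),
      ws.foldl pvStepB (acc, some (c, seg))
        = (ws.dropWhile pvND).foldl pvStepB (acc, some (c, seg ++ ws.takeWhile pvND)) := by
  induction ws with
  | nil => intro seg acc c; simp
  | cons w ws ih =>
      intro seg acc c
      cases hw : PySem.Chars.strIsdigit w.toList with
      | true => simp [List.dropWhile_cons, List.takeWhile_cons, pvND, hw]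
      | false =>
          have hstep : pvStepB (acc, some (c, seg)) w = (acc, some (c, seg ++ [w])) := by
            simp [pvStepB, hw]
          rw [List.dropWhile_cons, List.takeWhile_cons, List.foldl_cons, hstep,
            ih (seg ++ [w]) acc c]
          simp [pvND, hw, List.append_assoc]

lemma pvND_head_dropWhile :
    ∀ (ws : List String) (d : String) (rest : List String),
      ws.dropWhile pvND = d :: rest → PySem.Chars.strIsdigit d.toList = true := by
  intro ws
  induction ws with
  | nil => intro d rest h; simp at h
  | cons w ws ih =>
      intro d rest h
      rw [List.dropWhile_cons] at h
      cases hw : PySem.Chars.strIsdigit w.toList with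
      | false =>
          simp only [pvND, PySem.Str.strIsdigit_eq, hw, Bool.not_false, if_true] at h
          exact ih d rest h
      | true =>
          simp only [pvND, PySem.Str.strIsdigit_eq, hw, Bool.not_true, Bool.false_eq_true,
            if_false, List.cons.injEq] at h
          rw [← h.1]
          exact hw

lemma pvSegs_dropWhile : ∀ (ws : List String), pvSegs (ws.dropWhile pvND) = pvSegs ws := by
  intro ws
  induction ws with
  | nil => rfl
  | cons w ws ih =>
      cases hw : PySem.Chars.strIsdigit w.toList with
      | true => simp [List.dropWhile_cons, pvND, hw]
      | false =>
          have h2 : pvSegs (w :: ws) = pvSegs ws := by rw [pvSegs]; simp [hw]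
          simp [List.dropWhile_cons, pvND, hw, ih, h2]

lemma pvB_pend :
    ∀ (n : Nat) (ws : List String), ws.length ≤ n →
      ∀ (acc : List Int × List String) (c : String) (seg : List String),
        pvFin (ws.foldl pvStepB (acc, some (c, seg)))
          = (acc.1 ++ pvFC (c, seg ++ ws.takeWhile pvND) :: (pvSegs (ws.dropWhile pvND)).map pvFC,
             acc.2 ++ (pvGT (c, seg ++ ws.takeWhile pvND)).toList
                   ++ (pvSegs (ws.dropWhile pvND)).filterMap pvGT) := by
  intro n
  induction n with
  | zero =>
      intro ws hlen acc c seg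
      cases ws with
      | cons a l => simp at hlen
      | nil => simp [pvFin, pvClose_eq, pvSegs]
  | succ n ih =>
      intro ws hlen acc c seg
      rw [pvB_some]
      cases hd : ws.dropWhile pvND with
      | nil => simp [pvFin, pvClose_eq, pvSegs]
      | cons d rest =>
          have hdig : PySem.Chars.strIsdigit d.toList = true := pvND_head_dropWhile ws d rest hd
          have hlr : rest.length ≤ n := by
            have h1 := List.length_dropWhile_le pvND ws
            rw [hd] at h1
            simp only [List.length_cons] at h1
            omega
          have hstep : pvStepB (acc, some (c, seg ++ ws.takeWhile pvND)) d
              = (pvClose acc c (seg ++ ws.takeWhile pvND), some (d, [])) := by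
            simp [pvStepB, hdig]
          rw [List.foldl_cons, hstep, ih rest hlr]
          rw [pvSegs]
          simp only [PySem.Str.strIsdigit_eq, hdig, if_true, pvClose_eq]
          cases hgt : pvGT (d, rest.takeWhile pvND) <;> simp [hgt]

lemma pvB_run (ws : List String) (acc : List Int × List String) :
    pvFin (ws.foldl pvStepB (acc, none))
      = (acc.1 ++ (pvSegs ws).map pvFC, acc.2 ++ (pvSegs ws).filterMap pvGT) := by
  rw [pvB_none]
  cases hd : ws.dropWhile pvND with
  | nil =>
      have hsegs : pvSegs ws = [] := by rw [← pvSegs_dropWhile ws, hd]; simp [pvSegs]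
      simp [pvFin, hsegs]
  | cons d rest =>
      have hdig : PySem.Chars.strIsdigit d.toList = true := pvND_head_dropWhile ws d rest hd
      have hstep : pvStepB (acc, none) d = (acc, some (d, [])) := by simp [pvStepB, hdig]
      rw [List.foldl_cons, hstep, pvB_pend rest.length rest le_rfl]
      have hsegs : pvSegs ws = (d, rest.takeWhile pvND) :: pvSegs (rest.dropWhile pvND) := by
        rw [← pvSegs_dropWhile ws, hd, pvSegs]
        simp [hdig]
      rw [hsegs]
      cases hgt : pvGT (d, rest.takeWhile pvND) <;> simp [hgt]

-- ----- A-side: the index/zip/slice pairs compute exactly the segments -----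

lemma pvIdxs_cons (w : String) (ws : List String) (s : Int) :
    pvIdxs (w :: ws) s
      = if PySem.Chars.strIsdigit w.toList = true then s :: pvIdxs ws (s + 1)
        else pvIdxs ws (s + 1) := by
  cases hw : PySem.Chars.strIsdigit w.toList <;>
    simp [pvIdxs, PySem.List.enumerate_cons, List.filterMap_cons, hw]

lemma pvIdxs_shift (ws : List String) :
    ∀ (s t : Int), pvIdxs ws (s + t) = (pvIdxs ws s).map (· + t) := by
  induction ws with
  | nil => intro s t; simp [pvIdxs]
  | cons w ws ih =>
      intro s t
      rw [pvIdxs_cons, pvIdxs_cons]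
      have hst : s + t + 1 = (s + 1) + t := by ring
      rw [hst, ih (s + 1) t]
      cases hw : PySem.Chars.strIsdigit w.toList <;> simp [hw]

lemma pvIdxs_one (ws : List String) : pvIdxs ws 1 = (pvIdxs ws 0).map (· + 1) := by
  have := pvIdxs_shift ws 0 1
  simpa using this

lemma pvIdxs_nonneg (ws : List String) :
    ∀ (s i : Int), i ∈ pvIdxs ws s → s ≤ i := by
  induction ws with
  | nil => intro s i h; simp [pvIdxs] at h
  | cons w ws ih =>
      intro s i h
      rw [pvIdxs_cons] at h
      cases hw : PySem.Chars.strIsdigit w.toList with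
      | true =>
          rw [hw, if_pos rfl] at h
          rcases List.mem_cons.mp h with h | h
          · omega
          · have := ih (s + 1) i h; omega
      | false =>
          rw [hw] at h
          simp only [Bool.false_eq_true, if_false] at h
          have := ih (s + 1) i h; omega

lemma pvIdxs_nil (ws : List String) :
    ∀ (s : Int), pvIdxs ws s = [] → ws.takeWhile pvND = ws ∧ ws.dropWhile pvND = [] := by
  induction ws with
  | nil => intro s _; simp
  | cons w ws ih =>
      intro s h
      rw [pvIdxs_cons] at h
      cases hw : PySem.Chars.strIsdigit w.toList with
      | true => rw [hw, if_pos rfl] at h; simp at h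
      | false =>
          rw [hw] at h
          simp only [Bool.false_eq_true, if_false] at h
          have := ih (s + 1) h
          simp [List.takeWhile_cons, List.dropWhile_cons, pvND, hw, this.1, this.2]

lemma pvIdxs_head (ws : List String) :
    ∀ (i : Int) (r : List Int), pvIdxs ws 0 = i :: r →
      ∃ n : Nat, i = (n : Int) ∧ ws.takeWhile pvND = ws.take n ∧ ws.dropWhile pvND = ws.drop n := by
  induction ws with
  | nil => intro i r h; simp [pvIdxs] at h
  | cons w ws ih =>
      intro i r h
      rw [pvIdxs_cons] at h
      cases hw : PySem.Chars.strIsdigit w.toList with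
      | true =>
          rw [hw, if_pos rfl] at h
          refine ⟨0, ?_, ?_, ?_⟩
          · have hi0 := ((List.cons.injEq _ _ _ _).mp h).1
            simp [← hi0]
          · simp [List.takeWhile_cons, pvND, hw]
          · simp [List.dropWhile_cons, pvND, hw]
      | false =>
          rw [hw] at h
          simp only [Bool.false_eq_true, if_false] at h
          rw [show (0 : Int) + 1 = 1 by ring, pvIdxs_one] at h
          cases h0 : pvIdxs ws 0 with
          | nil => rw [h0] at h; simp at h
          | cons a l =>
              rw [h0] at h
              simp only [List.map_cons, List.cons.injEq] at h
              obtain ⟨n0, hn0, htk, hdr⟩ := ih a l h0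
              refine ⟨n0 + 1, ?_, ?_, ?_⟩
              · rw [← h.1, hn0]; push_cast; ring
              · simp [List.takeWhile_cons, pvND, hw, htk]
              · simp [List.dropWhile_cons, pvND, hw, hdr]

lemma pvGet_cons (w : String) (ws : List String) (s : Int) (hs : 0 ≤ s) :
    PySem.List.pyGet? (w :: ws) (s + 1) = PySem.List.pyGet? ws s := by
  obtain ⟨n, rfl⟩ := Int.eq_ofNat_of_zero_le hs
  have h1 : (n : Int) + 1 = ((n + 1 : Nat) : Int) := by push_cast; ring
  rw [h1]
  simp [PySem.List.pyGet?_natCast]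

lemma pvSliceFrom_cons (w : String) (ws : List String) (s : Int) (hs : 0 ≤ s) :
    PySem.List.slice (w :: ws) (some (s + 1 + 1)) none
      = PySem.List.slice ws (some (s + 1)) none := by
  obtain ⟨n, rfl⟩ := Int.eq_ofNat_of_zero_le hs
  have h1 : (n : Int) + 1 + 1 = ((n + 2 : Nat) : Int) := by push_cast; ring
  have h2 : (n : Int) + 1 = ((n + 1 : Nat) : Int) := by push_cast; ring
  rw [h1, h2, PySem.List.slice_from_natCast, PySem.List.slice_from_natCast]
  rfl

lemma pvSliceBoth_cons (w : String) (ws : List String) (s e : Int) (hs : 0 ≤ s) (he : 0 ≤ e) :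
    PySem.List.slice (w :: ws) (some (s + 1 + 1)) (some (e + 1))
      = PySem.List.slice ws (some (s + 1)) (some e) := by
  obtain ⟨n, rfl⟩ := Int.eq_ofNat_of_zero_le hs
  obtain ⟨m, rfl⟩ := Int.eq_ofNat_of_zero_le he
  have h1 : (n : Int) + 1 + 1 = ((n + 2 : Nat) : Int) := by push_cast; ring
  have h2 : (n : Int) + 1 = ((n + 1 : Nat) : Int) := by push_cast; ring
  have h3 : (m : Int) + 1 = ((m + 1 : Nat) : Int) := by push_cast; ring
  rw [h1, h2, h3, PySem.List.slice_natCast, PySem.List.slice_natCast]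
  have h4 : (n + 2) - (m + 1) = (n + 1) - m := by omega
  have h5 : (m + 1) - (n + 2) = m - (n + 1) := by omega
  simp [List.drop_succ_cons, h5]

lemma pvExtract_cons (w : String) (ws : List String) (s e : Int)
    (hs : 0 ≤ s) (he : e = -1 ∨ 0 ≤ e) :
    pvExtract (w :: ws) (s + 1, if e == -1 then e else e + 1) = pvExtract ws (s, e) := by
  rcases he with he | he
  · subst he
    unfold pvExtract
    simp only [beq_self_eq_true, if_true]
    rw [pvGet_cons w ws s hs, pvSliceFrom_cons w ws s hs]
  · have hne : (e == -1) = false := by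
      apply beq_false_of_ne; omega
    have hne2 : (e + 1 == -1) = false := by
      apply beq_false_of_ne; omega
    unfold pvExtract
    simp only [hne, hne2, if_false, Bool.false_eq_true]
    rw [pvGet_cons w ws s hs, pvSliceBoth_cons w ws s e hs he]

lemma pvShifted (w : String) (ws : List String) :
    ((((pvIdxs ws 0).map (· + 1)).zip (((pvIdxs ws 0).map (· + 1)).drop 1 ++ [-1])).map
        (pvExtract (w :: ws)))
      = (pvPairs ws).map (pvExtract ws) := by
  set l := pvIdxs ws 0 with hl
  have hmap : (l.map (· + 1)).drop 1 ++ [-1]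
      = (l.drop 1 ++ [-1]).map (fun e => if e == -1 then e else e + 1) := by
    have h2 : (l.drop 1).map (· + 1)
        = (l.drop 1).map (fun e => if e == -1 then e else e + 1) := by
      apply List.map_congr_left
      intro e hed
      have he : 0 ≤ e := pvIdxs_nonneg ws 0 e (List.mem_of_mem_drop hed)
      have hne : (e == -1) = false := by apply beq_false_of_ne; omega
      simp [hne]
    rw [List.map_append, ← List.map_drop, h2]
    simp
  rw [hmap, List.zip_map, List.map_map, pvPairs, ← hl]
  apply List.map_congr_left
  intro p hp
  rcases p with ⟨s, e⟩
  have hmem := List.of_mem_zip hp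
  have hs : 0 ≤ s := pvIdxs_nonneg ws 0 s hmem.1
  have he : e = -1 ∨ 0 ≤ e := by
    rcases List.mem_append.mp hmem.2 with h | h
    · exact Or.inr (pvIdxs_nonneg ws 0 e (List.mem_of_mem_drop h))
    · simp at h; exact Or.inl h
  exact pvExtract_cons w ws s e hs he

lemma pvASegs_eq : ∀ (ws : List String), (pvPairs ws).map (pvExtract ws) = pvSegs ws := by
  intro ws
  induction ws with
  | nil => simp [pvPairs, pvIdxs, PySem.List.enumerate, pvSegs]
  | cons w ws ih =>
      cases hw : PySem.Chars.strIsdigit w.toList with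
      | true =>
        rw [pvSegs]
        simp only [PySem.Str.strIsdigit_eq, hw, if_true]
        have hidx : pvIdxs (w :: ws) 0 = 0 :: (pvIdxs ws 0).map (· + 1) := by
          rw [pvIdxs_cons]
          simp [hw, pvIdxs_one (ws := ws), zero_add]
        cases h0 : pvIdxs ws 0 with
        | nil =>
            have hnil := pvIdxs_nil ws 0 h0
            rw [pvPairs, hidx, h0]
            simp only [List.map_nil, List.drop_succ_cons, List.drop_nil, List.nil_append,
              List.zip_cons_cons, List.zip_nil_right, List.map_cons, List.map_nil]
            rw [hnil.1, hnil.2, pvSegs]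
            unfold pvExtract
            simp [PySem.List.pyGet?, PySem.List.pyIdx?, PySem.List.slice_from_one]
        | cons i r =>
            obtain ⟨n, hn, htk, hdr⟩ := pvIdxs_head ws i r h0
            rw [pvPairs, hidx, h0]
            simp only [List.map_cons, List.drop_succ_cons, List.drop_zero, List.cons_append]
            have htail :
                ((((i + 1) :: r.map (· + 1)).zip ((r.map (· + 1)) ++ [-1])).map
                    (pvExtract (w :: ws)))
                  = pvSegs (List.dropWhile pvND ws) := by
              have hsh := pvShifted w ws
              rw [h0] at hsh
              simp only [List.map_cons, List.drop_succ_cons, List.drop_zero] at hsh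
              rw [pvSegs_dropWhile]
              exact hsh.trans ih
            have hzip : (0 :: (i + 1) :: List.map (fun x => x + 1) r).zip
                  ((i + 1) :: (List.map (fun x => x + 1) r ++ [-1]))
                = (0, i + 1) :: (((i + 1) :: List.map (fun x => x + 1) r).zip
                  (List.map (fun x => x + 1) r ++ [-1])) := rfl
            rw [hzip, List.map_cons, htail]
            congr 1
            have hi : 0 ≤ i := by rw [hn]; exact Int.natCast_nonneg n
            have hne : (i + 1 == -1) = false := by apply beq_false_of_ne; omega
            unfold pvExtract
            simp only [hne, if_false, Bool.false_eq_true]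
            have hget : (PySem.List.pyGet? (w :: ws) 0).getD "" = w := by
              simp [PySem.List.pyGet?, PySem.List.pyIdx?]
            have hslice : PySem.List.slice (w :: ws) (some (0 + 1)) (some (i + 1))
                = ws.take n := by
              rw [hn]
              have h1 : (0 : Int) + 1 = ((1 : Nat) : Int) := by norm_num
              have h2 : (n : Int) + 1 = ((n + 1 : Nat) : Int) := by push_cast; ring
              rw [h1, h2, PySem.List.slice_natCast]
              simp
            rw [hget, hslice, htk]
      | false =>
        have hidx : pvIdxs (w :: ws) 0 = (pvIdxs ws 0).map (· + 1) := by
          rw [pvIdxs_cons]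
          simp [hw, pvIdxs_one (ws := ws)]
        have hsg : pvSegs (w :: ws) = pvSegs ws := by rw [pvSegs]; simp [hw]
        rw [hsg, ← ih, pvPairs, hidx]
        exact pvShifted w ws

lemma pvA_eq_tail (cot : String) :
    map_multiset_from_cot cot
      = pvTail ((pvSegs ((PySem.Str.split? cot " ").getD [])).map pvFC,
                (pvSegs ((PySem.Str.split? cot " ").getD [])).filterMap pvGT) := by
  simp only [map_multiset_from_cot, pvTail]
  set ws := (PySem.Str.split? cot " ").getD [] with hws
  have hpairs :
      ((PySem.List.enumerate ws).filterMap
          (fun p => if PySem.Str.strIsdigit p.2 then some p.1 else none)).zip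
        (((PySem.List.enumerate ws).filterMap
          (fun p => if PySem.Str.strIsdigit p.2 then some p.1 else none)).drop 1 ++ [-1])
        = pvPairs ws := rfl
  rw [hpairs, pvA_fold ws (pvPairs ws) ([], []), pvASegs_eq ws]
  simp

lemma pvB_eq_tail (cot : String) :
    map_multiset_from_cot_alt cot
      = pvTail ((pvSegs ((PySem.Str.split? cot " ").getD [])).map pvFC,
                (pvSegs ((PySem.Str.split? cot " ").getD [])).filterMap pvGT) := by
  simp only [map_multiset_from_cot_alt, pvTail]
  set ws := (PySem.Str.split? cot " ").getD [] with hws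
  have hfin : (match (ws.foldl pvStepB (([], []), none)).2 with
      | some cur => pvClose (ws.foldl pvStepB (([], []), none)).1 cur.1 cur.2
      | none => (ws.foldl pvStepB (([], []), none)).1)
      = pvFin (ws.foldl pvStepB (([], []), none)) := rfl
  rw [hfin, pvB_run ws ([], [])]
  simp

-- ===== VERDICT (by name: the statement is the Claim_ definition above) =====
theorem map_multiset_from_cot_spec : Claim_equal_map_multiset_from_cot := by
  intro cot _
  unfold Spec_map_multiset_from_cot
  rw [pvA_eq_tail, pvB_eq_tail]
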